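-- pv_equiv track=rewrite | github.com/mahaekoh/eu-policy-feedback-impact-analysis | src/text_utils.py | group_by_char_budget
-- ===== SOURCE A (Python) =====
-- def group_by_char_budget(texts: list, max_chars: int) -> list:
--     """Group texts greedily so each group's combined length fits within max_chars."""
--     groups = []
--     current_group = []
--     current_len = 0
--     separator_len = 2  # "\n\n" between items
--
--     for text in texts:
--         added_len = len(text) + (separator_len if current_group else 0)
--         if current_group and current_len + added_len > max_chars:
--             groups.append(current_group)
--             current_group = [text]
--             current_len = len(text)
--         else:
--             current_group.append(text)
--             current_len += added_len
--
--     if current_group: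
--         groups.append(current_group)
--
--     return groups
-- ===== SOURCE B (Python) =====
-- def group_by_char_budget(texts: list, max_chars: int) -> list:
--     """Group texts greedily so each group's combined length fits within max_chars.
--
--     Maintains only the list of groups: a text extends the last group when the
--     actually-joined candidate still fits, else it starts a new group. No
--     separate current-group variable, no running-length accumulator, no final
--     flush step.
--     """
--     groups = []
--     for text in texts:
--         if groups and len("\n\n".join(groups[-1] + [text])) <= max_chars:
--             groups[-1].append(text)
--         else:
--             groups.append([text])
--     return groups
-- ===== Notes on version B (the rewrite author's own statement) =====
-- stated objective: alternative
-- what changed: A's loop state (groups, current_group, current_len) with a final flush is replaced by a loop over only the groups list: each text either extends groups[-1], when the actually joined candidate len('\n\n'.join(groups[-1]+[text])) still fits, or starts a new group; there is no running-length accumulator, no separate current group and no flush step, at the cost of re-measuring the joined group each step.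
import Mathlib
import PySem

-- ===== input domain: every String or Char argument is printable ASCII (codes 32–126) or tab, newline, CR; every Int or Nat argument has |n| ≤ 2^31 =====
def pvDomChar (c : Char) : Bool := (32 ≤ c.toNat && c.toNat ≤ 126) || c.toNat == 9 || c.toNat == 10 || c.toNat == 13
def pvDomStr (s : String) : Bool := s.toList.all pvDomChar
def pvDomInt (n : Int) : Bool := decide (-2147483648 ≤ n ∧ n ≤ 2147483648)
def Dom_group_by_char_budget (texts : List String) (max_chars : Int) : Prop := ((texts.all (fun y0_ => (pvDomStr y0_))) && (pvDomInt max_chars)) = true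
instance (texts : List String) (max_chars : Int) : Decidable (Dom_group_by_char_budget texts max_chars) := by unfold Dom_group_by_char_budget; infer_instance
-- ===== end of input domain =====

-- B maintains only the groups list (no current-group variable, no running-length
-- accumulator, no final flush): a text extends the last group when the joined
-- candidate fits, else starts a new group (objective: alternative decomposition).

-- ===== PORT A =====
-- one loop step of A: state = (groups, current_group, current_len); separator_len = 2
def pvStepA (max_chars : Int) (s : List (List String) × List String × Int) (text : String) :
    List (List String) × List String × Int :=
  let added_len := PySem.Str.len text + (if s.2.1 ≠ [] then (2 : Int) else 0)
  if s.2.1 ≠ [] ∧ s.2.2 + added_len > max_chars then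
    (s.1 ++ [s.2.1], [text], PySem.Str.len text)
  else
    (s.1, s.2.1 ++ [text], s.2.2 + added_len)

def group_by_char_budget (texts : List String) (max_chars : Int) : List (List String) :=
  let st := texts.foldl (pvStepA max_chars) ([], [], 0)
  if st.2.1 ≠ [] then st.1 ++ [st.2.1] else st.1

-- ===== PORT B =====
-- one loop step of B: extend the last group when the joined candidate fits, else start a new group
def pvStepB (max_chars : Int) (groups : List (List String)) (text : String) : List (List String) :=
  if groups ≠ [] ∧
      PySem.Str.len (PySem.Str.join "\n\n" ((groups.getLast?.getD []) ++ [text])) ≤ max_chars then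
    groups.dropLast ++ [(groups.getLast?.getD []) ++ [text]]
  else
    groups ++ [[text]]

def group_by_char_budget_alt (texts : List String) (max_chars : Int) : List (List String) :=
  texts.foldl (pvStepB max_chars) []

-- ===== PRECONDITION & SPEC =====
def Spec_group_by_char_budget (texts : List String) (max_chars : Int) (out : List (List String)) : Prop := out = group_by_char_budget_alt texts max_chars
instance (texts : List String) (max_chars : Int) (out : List (List String)) : Decidable (Spec_group_by_char_budget texts max_chars out) := by unfold Spec_group_by_char_budget; infer_instance

-- ===== CLAIM (what is proved, stated in full; the proofs are below) =====
def Claim_equal_group_by_char_budget : Prop := ∀ (texts : List String) (max_chars : Int), Dom_group_by_char_budget texts max_chars → Spec_group_by_char_budget texts max_chars (group_by_char_budget texts max_chars)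

-- ===== LEMMAS AND PROOFS =====

-- length of the "\n\n"-joined group
def pvJL (g : List String) : Int := PySem.Str.len (PySem.Str.join "\n\n" g)

theorem pvJL_singleton (t : String) : pvJL [t] = PySem.Str.len t := by
  simp [pvJL, PySem.Str.join, PySem.Str.len, PySem.Chars.join, List.intercalate]

theorem pvJL_cons_cons (a b : String) (l : List String) :
    pvJL (a :: b :: l) = PySem.Str.len a + 2 + pvJL (b :: l) := by
  simp [pvJL, PySem.Str.join, PySem.Str.len, PySem.Chars.join, List.intercalate]
  ring

theorem pvJL_append (g : List String) (t : String) (h : g ≠ []) :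
    pvJL (g ++ [t]) = pvJL g + 2 + PySem.Str.len t := by
  induction g with
  | nil => simp at h
  | cons a l ih =>
    cases l with
    | nil => rw [List.cons_append, List.nil_append, pvJL_cons_cons, pvJL_singleton, pvJL_singleton]
    | cons b l2 =>
      have hb := ih (by simp)
      simp only [List.cons_append] at hb ⊢
      rw [pvJL_cons_cons, hb, pvJL_cons_cons]
      ring

-- loop invariant: once the current group is non-empty, A's fold (with
-- current_len = pvJL cur) followed by the final flush equals B's fold started
-- from groups ++ [cur]
theorem pv_loop_eq (m : Int) (rest : List String) :
    ∀ (cur : List String) (groups : List (List String)), cur ≠ [] →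
    (let st := rest.foldl (pvStepA m) (groups, cur, pvJL cur);
     if st.2.1 ≠ [] then st.1 ++ [st.2.1] else st.1)
      = rest.foldl (pvStepB m) (groups ++ [cur]) := by
  induction rest with
  | nil =>
    intro cur groups h
    simp [h]
  | cons t rest ih =>
    intro cur groups h
    by_cases hc : m < pvJL cur + ((t.length : Int) + 2)
    · have hstepA : pvStepA m (groups, cur, pvJL cur) t = (groups ++ [cur], [t], pvJL [t]) := by
        simp [pvStepA, h, hc, pvJL_singleton]
      have hstepB : pvStepB m (groups ++ [cur]) t = (groups ++ [cur]) ++ [[t]] := by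
        unfold pvStepB
        rw [if_neg]
        rintro ⟨-, hle⟩
        rw [List.getLast?_concat] at hle
        simp only [Option.getD_some] at hle
        have h2 : pvJL (cur ++ [t]) ≤ m := hle
        rw [pvJL_append cur t h] at h2
        simp only [PySem.Str.len_eq, String.length_toList] at h2
        omega
      simp only [List.foldl_cons, hstepA, hstepB]
      exact ih [t] (groups ++ [cur]) (by simp)
    · have hstepA : pvStepA m (groups, cur, pvJL cur) t
          = (groups, cur ++ [t], pvJL (cur ++ [t])) := by
        simp [pvStepA, h, hc, pvJL_append cur t h]
        ring
      have hstepB : pvStepB m (groups ++ [cur]) t = groups ++ [cur ++ [t]] := by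
        unfold pvStepB
        rw [if_pos]
        · rw [List.getLast?_concat, List.dropLast_concat]
          simp
        · refine ⟨by simp, ?_⟩
          rw [List.getLast?_concat]
          simp only [Option.getD_some]
          show pvJL (cur ++ [t]) ≤ m
          rw [pvJL_append cur t h]
          simp only [PySem.Str.len_eq, String.length_toList]
          omega
      simp only [List.foldl_cons, hstepA, hstepB]
      exact ih (cur ++ [t]) groups (by simp)

-- ===== VERDICT (by name: the statement is the Claim_ definition above) =====
theorem group_by_char_budget_spec : Claim_equal_group_by_char_budget := by
  intro texts max_chars _
  unfold Spec_group_by_char_budget group_by_char_budget group_by_char_budget_alt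
  cases texts with
  | nil => simp
  | cons t rest =>
    have hstepA : pvStepA max_chars ([], [], 0) t = ([], [t], pvJL [t]) := by
      simp [pvStepA, pvJL_singleton]
    have hstepB : pvStepB max_chars [] t = [[t]] := by
      simp [pvStepB]
    simp only [List.foldl_cons, hstepA, hstepB]
    have := pv_loop_eq max_chars rest [t] [] (by simp)
    simpa using this
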